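-- pv_equiv track=rewrite | github.com/OpenPecha/Pydurma | src/CommonSpell/serializers/md.py | regroup_same_diffs
-- ===== SOURCE A (Python) =====
-- def regroup_same_diffs(diff_tokens):
--     regrouped_notes = {}
--     for version_name, diff_string in diff_tokens.items():
--         regrouped_notes[diff_string] = [version_name] if diff_string not in regrouped_notes.keys() else regrouped_notes[diff_string] + [version_name]
--     for diff_string, versions in regrouped_notes.items():
--         versions.sort()
--         regrouped_notes[diff_string] = versions
--     return regrouped_notes
-- ===== SOURCE B (Python) =====
-- def regroup_same_diffs(diff_tokens):
--     regrouped_notes = {}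
--     for version_name, diff_string in diff_tokens.items():
--         group = regrouped_notes.setdefault(diff_string, [])
--         i = 0
--         while i < len(group) and group[i] < version_name:
--             i += 1
--         group.insert(i, version_name)
--     return regrouped_notes
-- ===== Notes on version B (the rewrite author's own statement) =====
-- stated objective: alternative
-- what changed: Single pass that inserts each version name at its sorted position in its group (setdefault + in-place sorted insertion), replacing A's build-by-append loop followed by a second loop that sorts every group.
import Mathlib
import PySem

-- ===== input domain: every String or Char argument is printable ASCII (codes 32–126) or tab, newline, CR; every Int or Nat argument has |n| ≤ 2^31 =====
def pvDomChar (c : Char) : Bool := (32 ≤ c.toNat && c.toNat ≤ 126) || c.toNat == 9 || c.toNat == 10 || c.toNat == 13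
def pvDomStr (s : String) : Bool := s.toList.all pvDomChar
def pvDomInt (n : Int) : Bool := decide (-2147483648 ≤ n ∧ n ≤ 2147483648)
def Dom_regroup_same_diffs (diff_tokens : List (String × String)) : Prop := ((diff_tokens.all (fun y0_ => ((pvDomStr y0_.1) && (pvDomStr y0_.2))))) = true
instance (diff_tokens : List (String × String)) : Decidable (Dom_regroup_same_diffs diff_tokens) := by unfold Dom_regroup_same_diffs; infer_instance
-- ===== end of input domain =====

-- B replaces A's append-then-sort-each-group two-loop construction by a single pass that keeps
-- every group sorted via in-place sorted insertion (objective: alternative decomposition).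

-- ===== PORT A =====
-- first loop: regrouped_notes[diff_string] = [vn] if absent else old + [vn]
-- second loop: versions.sort(); regrouped_notes[diff_string] = versions (overwrite keeps position)
def regroup_same_diffs (diff_tokens : List (String × String)) : List (String × List String) :=
  let d1 := diff_tokens.foldl
    (fun d p =>
      d.insert p.2 (if d.contains p.2 = false then [p.1] else d.getD p.2 [] ++ [p.1]))
    PySem.Dict.empty
  let d2 := d1.items.foldl
    (fun d q => d.insert q.1 (PySem.List.sorted q.2 (fun x => x) false)) d1
  d2.items

-- ===== PORT B =====
-- the while loop 'i = 0; while i < len(group) and group[i] < vn: i += 1; group.insert(i, vn)':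
-- walk past the elements strictly below vn, insert vn there
def insSorted (v : String) : List String → List String
  | [] => [v]
  | x :: xs => if x < v then x :: insSorted v xs else v :: x :: xs

def regroup_same_diffs_alt (diff_tokens : List (String × String)) : List (String × List String) :=
  (diff_tokens.foldl
    (fun d p => d.insert p.2 (insSorted p.1 (d.getD p.2 []))) PySem.Dict.empty).items

-- ===== PRECONDITION & SPEC =====
def Spec_regroup_same_diffs (diff_tokens : List (String × String)) (out : List (String × List String)) : Prop := out = regroup_same_diffs_alt diff_tokens
instance (diff_tokens : List (String × String)) (out : List (String × List String)) : Decidable (Spec_regroup_same_diffs diff_tokens out) := by unfold Spec_regroup_same_diffs; infer_instance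

-- ===== CLAIM (what is proved, stated in full; the proofs are below) =====
def Claim_equal_regroup_same_diffs : Prop := ∀ (diff_tokens : List (String × String)), Dom_regroup_same_diffs diff_tokens → Spec_regroup_same_diffs diff_tokens (regroup_same_diffs diff_tokens)

-- ===== LEMMAS AND PROOFS =====

theorem insSorted_perm (v : String) (ys : List String) : (insSorted v ys).Perm (v :: ys) := by
  induction ys with
  | nil => simp [insSorted]
  | cons x xs ih =>
    simp only [insSorted]
    split
    · exact (ih.cons x).trans (List.Perm.swap v x xs)
    · exact List.Perm.refl _

theorem insSorted_pairwise (v : String) (ys : List String)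
    (h : ys.Pairwise (· ≤ ·)) : (insSorted v ys).Pairwise (· ≤ ·) := by
  induction ys with
  | nil => simp [insSorted]
  | cons x xs ih =>
    rcases List.pairwise_cons.mp h with ⟨hx, hxs⟩
    simp only [insSorted]
    split
    · rename_i hlt
      refine List.pairwise_cons.mpr ⟨?_, ih hxs⟩
      intro y hy
      rcases List.mem_cons.mp ((insSorted_perm v xs).mem_iff.mp hy) with hy | hy
      · subst hy; exact le_of_lt hlt
      · exact hx y hy
    · rename_i hnlt
      refine List.pairwise_cons.mpr ⟨?_, h⟩
      intro y hy
      rcases List.mem_cons.mp hy with hy | hy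
      · subst hy; exact le_of_not_gt (fun hc => hnlt hc)
      · exact le_trans (le_of_not_gt (fun hc => hnlt hc)) (hx y hy)

theorem insSorted_sorted (v : String) (l : List String) :
    insSorted v (PySem.List.sorted l (fun x => x) false)
      = PySem.List.sorted (l ++ [v]) (fun x => x) false := by
  apply PySem.List.eq_of_perm_of_pairwise_le_of_injective (fun x : String => x)
    (fun _ _ h => h)
  · exact ((insSorted_perm v _).trans
      (((PySem.List.sorted_perm l (fun x => x) false).cons v).trans
        (List.perm_append_singleton v l).symm)).trans
      (PySem.List.sorted_perm (l ++ [v]) (fun x => x) false).symm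
  · exact insSorted_pairwise v _ (PySem.List.sorted_pairwise l (fun x => x))
  · exact PySem.List.sorted_pairwise (l ++ [v]) (fun x => x)

-- invariant relating A's first-pass dict and B's dict: same keys, B's groups are A's sorted
def GroupInv (dA dB : PySem.Dict String (List String)) : Prop :=
  dA.keys = dB.keys ∧ ∀ k, dB.getD k [] = PySem.List.sorted (dA.getD k []) (fun x => x) false

theorem inv_step (dA dB : PySem.Dict String (List String)) (p : String × String)
    (h : GroupInv dA dB) :
    GroupInv (dA.insert p.2 (if dA.contains p.2 = false then [p.1] else dA.getD p.2 [] ++ [p.1]))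
        (dB.insert p.2 (insSorted p.1 (dB.getD p.2 []))) := by
  rcases h with ⟨hk, hg⟩
  have hbranch : (if dA.contains p.2 = false then [p.1] else dA.getD p.2 [] ++ [p.1])
      = dA.getD p.2 [] ++ [p.1] := by
    by_cases hc : dA.contains p.2 = false
    · rw [if_pos hc, PySem.Dict.getD_of_not_contains dA _ hc]; rfl
    · rw [if_neg hc]
  rw [hbranch]
  constructor
  · by_cases hc : dA.contains p.2 = false
    · have hc' : dB.contains p.2 = false := by
        by_contra hb
        have hbt : dB.contains p.2 = true := by revert hb; cases dB.contains p.2 <;> simp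
        rw [PySem.Dict.contains_iff_mem_keys, ← hk,
            ← PySem.Dict.contains_iff_mem_keys, hc] at hbt
        cases hbt
      rw [PySem.Dict.keys_insert_of_not_contains dA _ hc,
          PySem.Dict.keys_insert_of_not_contains dB _ hc', hk]
    · have hct : dA.contains p.2 = true := by revert hc; cases dA.contains p.2 <;> simp
      have hc' : dB.contains p.2 = true := by
        rw [PySem.Dict.contains_iff_mem_keys] at hct ⊢; rwa [← hk]
      rw [PySem.Dict.keys_insert_of_contains dA _ hct,
          PySem.Dict.keys_insert_of_contains dB _ hc', hk]
  · intro k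
    by_cases hkp : k = p.2
    · subst hkp
      rw [PySem.Dict.getD_insert_self, PySem.Dict.getD_insert_self, hg, insSorted_sorted]
    · rw [PySem.Dict.getD_insert_of_ne dA _ _ hkp,
          PySem.Dict.getD_insert_of_ne dB _ _ hkp, hg]

theorem inv_fold (l : List (String × String)) (dA dB : PySem.Dict String (List String))
    (h : GroupInv dA dB) :
    GroupInv (l.foldl (fun d p =>
          d.insert p.2 (if d.contains p.2 = false then [p.1] else d.getD p.2 [] ++ [p.1])) dA)
        (l.foldl (fun d p => d.insert p.2 (insSorted p.1 (d.getD p.2 []))) dB) := by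
  induction l generalizing dA dB with
  | nil => exact h
  | cons p t ih => exact ih _ _ (inv_step dA dB p h)

-- A's second pass, getD view: a key not among the fold's keys is untouched …
theorem getD_fold2_not_mem (ps : List (String × List String))
    (e : PySem.Dict String (List String)) (k : String)
    (hk : k ∉ ps.map (·.1)) :
    (ps.foldl (fun d q => d.insert q.1 (PySem.List.sorted q.2 (fun x => x) false)) e).getD k []
      = e.getD k [] := by
  induction ps generalizing e with
  | nil => rfl
  | cons q t ih =>
    simp only [List.map_cons, List.mem_cons, not_or] at hk
    simp only [List.foldl_cons]
    rw [ih _ hk.2, PySem.Dict.getD_insert_of_ne e _ _ hk.1]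

-- … and a key bound in ps (keys of ps distinct) gets the sorted value
theorem getD_fold2_mem (ps : List (String × List String))
    (e : PySem.Dict String (List String)) (k : String) (v : List String)
    (hmem : (k, v) ∈ ps) (hnd : (ps.map (·.1)).Nodup) :
    (ps.foldl (fun d q => d.insert q.1 (PySem.List.sorted q.2 (fun x => x) false)) e).getD k []
      = PySem.List.sorted v (fun x => x) false := by
  induction ps generalizing e with
  | nil => cases hmem
  | cons q t ih =>
    simp only [List.map_cons, List.nodup_cons] at hnd
    simp only [List.foldl_cons]
    rcases List.mem_cons.mp hmem with hqe | hmem'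
    · subst hqe
      have hknot : k ∉ t.map (·.1) := by simpa using hnd.1
      rw [getD_fold2_not_mem _ _ _ hknot]
      exact PySem.Dict.getD_insert_self e k _ []
    · exact ih _ hmem' hnd.2

theorem regroup_same_diffs_eq (diff_tokens : List (String × String)) :
    regroup_same_diffs diff_tokens = regroup_same_diffs_alt diff_tokens := by
  unfold regroup_same_diffs regroup_same_diffs_alt
  set d1 := diff_tokens.foldl
    (fun d p =>
      d.insert p.2 (if d.contains p.2 = false then [p.1] else d.getD p.2 [] ++ [p.1]))
    PySem.Dict.empty with hd1
  set dB := diff_tokens.foldl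
    (fun d p => d.insert p.2 (insSorted p.1 (d.getD p.2 []))) PySem.Dict.empty with hdB
  set d2 := d1.items.foldl
    (fun d q => d.insert q.1 (PySem.List.sorted q.2 (fun x => x) false)) d1 with hd2
  have hinv : GroupInv d1 dB := by
    rw [hd1, hdB]
    exact inv_fold diff_tokens _ _ ⟨rfl, fun _ => rfl⟩
  have hnd1 : d1.keys.Nodup := by
    rw [hd1]
    exact PySem.Dict.nodup_keys_foldl_insert_key diff_tokens (·.2) _ _
      PySem.Dict.nodup_keys_empty
  have hndB : dB.keys.Nodup := hinv.1 ▸ hnd1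
  -- keys of d2: folding inserts at keys already present leaves keys unchanged
  have hmap1 : d1.items.map (·.1) = d1.keys := by
    simp only [PySem.Dict.keys]
  have hkeys2 : d2.keys = d1.keys := by
    rw [hd2, PySem.Dict.keys_foldl_insert_key, hmap1,
        PySem.Set.update_eq_append_filter]
    have hfil : (PySem.Set.ofList d1.keys).filter
        (fun y => !(PySem.Set.contains d1.keys y)) = [] := by
      apply List.filter_eq_nil_iff.mpr
      intro y hy
      have hy' : y ∈ d1.keys := (PySem.Set.mem_ofList d1.keys y).mp hy
      simp [PySem.Set.contains, hy']
    rw [hfil, List.append_nil]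
  have hnd2 : d2.keys.Nodup := hkeys2 ▸ hnd1
  -- items of a nodup-key dict are determined by keys and getD
  rw [PySem.Dict.items_eq_map_keys d2 hnd2 ([] : List String),
      PySem.Dict.items_eq_map_keys dB hndB ([] : List String),
      hkeys2, hinv.1]
  apply List.map_congr_left
  intro k hkmem
  have hkd1 : k ∈ d1.keys := hinv.1 ▸ hkmem
  have hmemitems : (k, d1.getD k []) ∈ d1.items := by
    rw [PySem.Dict.items_eq_map_keys d1 hnd1 ([] : List String)]
    exact List.mem_map.mpr ⟨k, hkd1, rfl⟩
  have hndps : (d1.items.map (·.1)).Nodup := hmap1 ▸ hnd1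
  have hget2 : d2.getD k [] = PySem.List.sorted (d1.getD k []) (fun x => x) false := by
    rw [hd2]; exact getD_fold2_mem d1.items d1 k (d1.getD k []) hmemitems hndps
  rw [hget2, hinv.2 k]

-- ===== VERDICT (by name: the statement is the Claim_ definition above) =====
theorem regroup_same_diffs_spec : Claim_equal_regroup_same_diffs := by
  intro diff_tokens _
  unfold Spec_regroup_same_diffs
  exact regroup_same_diffs_eq diff_tokens
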